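-- pv_equiv track=rewrite | github.com/YannickHauser/GoabaseEvents | app.py | get_marker_color
-- ===== SOURCE A (Python) =====
-- from typing import Any
--
-- def get_marker_color(event: dict[str, Any]) -> str:
--     genres = [str(g).lower() for g in event.get("genres", [])]
--
--     if any(g in genres for g in ["festival"]):
--         return "purple"
--     if any(g in genres for g in ["club"]):
--         return "blue"
--     if any(g in genres for g in ["open air", "outdoor"]):
--         return "green"
--     if any(g in genres for g in ["psytrance", "goa"]):
--         return "darkpurple"
--     if any(g in genres for g in ["techno"]):
--         return "cadetblue"
--
--     return "gray"
-- ===== SOURCE B (Python) =====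
-- def get_marker_color(event):
--     rank = {"festival": 0, "club": 1, "open air": 2, "outdoor": 2,
--             "psytrance": 3, "goa": 3, "techno": 4}
--     colors = ["purple", "blue", "green", "darkpurple", "cadetblue"]
--     best = 5
--     for g in event.get("genres", []):
--         r = rank.get(str(g).lower(), 5)
--         if r < best:
--             best = r
--     return colors[best] if best < 5 else "gray"
-- ===== Notes on version B (the rewrite author's own statement) =====
-- stated objective: alternative
-- what changed: Replaces the five sequential any()-membership cascades over the genre list with a keyword-to-priority-rank dict and a single pass over the genres tracking the minimum rank, indexing a rank-to-color table at the end (gray if nothing matched).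
import Mathlib
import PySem

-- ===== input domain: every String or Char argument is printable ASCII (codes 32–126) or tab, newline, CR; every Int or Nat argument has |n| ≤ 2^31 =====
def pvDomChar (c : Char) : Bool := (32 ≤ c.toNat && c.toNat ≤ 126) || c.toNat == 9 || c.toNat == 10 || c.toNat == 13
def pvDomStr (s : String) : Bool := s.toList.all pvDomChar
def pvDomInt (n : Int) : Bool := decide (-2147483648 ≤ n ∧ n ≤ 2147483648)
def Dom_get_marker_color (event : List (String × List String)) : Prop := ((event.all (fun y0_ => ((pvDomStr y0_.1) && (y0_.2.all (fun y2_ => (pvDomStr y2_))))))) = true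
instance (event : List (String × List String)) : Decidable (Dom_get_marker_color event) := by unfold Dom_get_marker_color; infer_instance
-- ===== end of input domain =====

-- B replaces A's five sequential any()-membership cascades with a keyword→rank dict,
-- one pass over the genres tracking the minimum rank, and a rank→color table (objective: alternative).

-- ===== PORT A =====
def get_marker_color (event : List (String × List String)) : String :=
  let genres := ((List.lookup "genres" event).getD []).map PySem.Str.lower
  if ["festival"].any (fun g => genres.contains g) then "purple"
  else if ["club"].any (fun g => genres.contains g) then "blue"
  else if ["open air", "outdoor"].any (fun g => genres.contains g) then "green"
  else if ["psytrance", "goa"].any (fun g => genres.contains g) then "darkpurple"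
  else if ["techno"].any (fun g => genres.contains g) then "cadetblue"
  else "gray"

-- ===== PORT B =====
def pvRankDict : PySem.Dict String Int :=
  PySem.Dict.ofList [("festival", 0), ("club", 1), ("open air", 2), ("outdoor", 2),
                     ("psytrance", 3), ("goa", 3), ("techno", 4)]

def pvColors : List String := ["purple", "blue", "green", "darkpurple", "cadetblue"]

def get_marker_color_alt (event : List (String × List String)) : String :=
  let best := ((List.lookup "genres" event).getD []).foldl
    (fun best g =>
      let r := pvRankDict.getD (PySem.Str.lower g) 5
      if r < best then r else best) 5
  if best < 5 then (PySem.List.pyGet? pvColors best).getD "" else "gray"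

-- ===== PRECONDITION & SPEC =====
def Spec_get_marker_color (event : List (String × List String)) (out : String) : Prop := out = get_marker_color_alt event
instance (event : List (String × List String)) (out : String) : Decidable (Spec_get_marker_color event out) := by unfold Spec_get_marker_color; infer_instance

-- ===== CLAIM (what is proved, stated in full; the proofs are below) =====
def Claim_equal_get_marker_color : Prop := ∀ (event : List (String × List String)), Dom_get_marker_color event → Spec_get_marker_color event (get_marker_color event)

-- ===== LEMMAS AND PROOFS =====

-- the rank B's dict assigns to one genre
def pvRk (g : String) : Int := pvRankDict.getD (PySem.Str.lower g) 5

lemma pvRk_eq (g : String) : pvRk g =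
    (if PySem.Str.lower g = "festival" then 0
     else if PySem.Str.lower g = "club" then 1
     else if PySem.Str.lower g = "open air" then 2
     else if PySem.Str.lower g = "outdoor" then 2
     else if PySem.Str.lower g = "psytrance" then 3
     else if PySem.Str.lower g = "goa" then 3
     else if PySem.Str.lower g = "techno" then 4
     else 5) := by
  have hitems : pvRankDict.items = [("festival", 0), ("club", 1), ("open air", 2), ("outdoor", 2), ("psytrance", 3), ("goa", 3), ("techno", 4)] := rfl
  simp only [pvRk, PySem.Dict.getD, PySem.Dict.get?, hitems]
  by_cases h0 : PySem.Str.lower g = "festival"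
  · rw [List.find?_cons_of_pos (by simp [h0])]
    simp [h0]
  · rw [List.find?_cons_of_neg (by simp only [beq_iff_eq]; exact fun h => h0 h.symm)]
    by_cases h1 : PySem.Str.lower g = "club"
    · rw [List.find?_cons_of_pos (by simp [h1])]
      simp [h1]
    · rw [List.find?_cons_of_neg (by simp only [beq_iff_eq]; exact fun h => h1 h.symm)]
      by_cases h2 : PySem.Str.lower g = "open air"
      · rw [List.find?_cons_of_pos (by simp [h2])]
        simp [h2]
      · rw [List.find?_cons_of_neg (by simp only [beq_iff_eq]; exact fun h => h2 h.symm)]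
        by_cases h3 : PySem.Str.lower g = "outdoor"
        · rw [List.find?_cons_of_pos (by simp [h3])]
          simp [h3]
        · rw [List.find?_cons_of_neg (by simp only [beq_iff_eq]; exact fun h => h3 h.symm)]
          by_cases h4 : PySem.Str.lower g = "psytrance"
          · rw [List.find?_cons_of_pos (by simp [h4])]
            simp [h4]
          · rw [List.find?_cons_of_neg (by simp only [beq_iff_eq]; exact fun h => h4 h.symm)]
            by_cases h5 : PySem.Str.lower g = "goa"
            · rw [List.find?_cons_of_pos (by simp [h5])]
              simp [h5]
            · rw [List.find?_cons_of_neg (by simp only [beq_iff_eq]; exact fun h => h5 h.symm)]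
              by_cases h6 : PySem.Str.lower g = "techno"
              · rw [List.find?_cons_of_pos (by simp [h6])]
                simp [h6]
              · rw [List.find?_cons_of_neg (by simp only [beq_iff_eq]; exact fun h => h6 h.symm)]
                simp [h0, h1, h2, h3, h4, h5, h6]


-- B's fold over the genre list
def pvF (gs : List String) (b : Int) : Int :=
  gs.foldl (fun best g => if pvRk g < best then pvRk g else best) b

lemma pvF_le_init (gs : List String) (b : Int) : pvF gs b ≤ b := by
  induction gs generalizing b with
  | nil => simp [pvF]
  | cons g gs ih =>
    simp only [pvF, List.foldl_cons] at *
    split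
    · exact le_trans (ih _) (le_of_lt (by assumption))
    · exact ih _

lemma pvF_le_mem (gs : List String) (b : Int) (g : String) (hg : g ∈ gs) : pvF gs b ≤ pvRk g := by
  induction gs generalizing b with
  | nil => cases hg
  | cons x xs ih =>
    simp only [pvF, List.foldl_cons] at *
    rcases List.mem_cons.mp hg with h | h
    · subst h
      split
      · exact pvF_le_init xs _
      · exact le_trans (pvF_le_init xs _) (by omega)
    · exact ih _ h

lemma pvF_lb (gs : List String) (b c : Int) (hb : c ≤ b) (h : ∀ g ∈ gs, c ≤ pvRk g) :
    c ≤ pvF gs b := by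
  induction gs generalizing b with
  | nil => simpa [pvF]
  | cons x xs ih =>
    simp only [pvF, List.foldl_cons]
    split
    · exact ih _ (h x (by simp)) (fun g hg => h g (by simp [hg]))
    · exact ih _ hb (fun g hg => h g (by simp [hg]))

-- ===== VERDICT (by name: the statement is the Claim_ definition above) =====
theorem get_marker_color_spec : Claim_equal_get_marker_color := by
  intro event _
  unfold Spec_get_marker_color get_marker_color get_marker_color_alt
  set gs := (List.lookup "genres" event).getD [] with hgs
  have hfold : gs.foldl
      (fun best g =>
        let r := pvRankDict.getD (PySem.Str.lower g) 5
        if r < best then r else best) 5 = pvF gs 5 := rfl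
  rw [hfold]
  have key : ∀ k : String, ((gs.map PySem.Str.lower).contains k = true) ↔
      ∃ g ∈ gs, PySem.Str.lower g = k := by
    intro k; simp [List.mem_map]
  have rk_cases : ∀ g : String, pvRk g = 0 ∨ pvRk g = 1 ∨ pvRk g = 2 ∨ pvRk g = 3 ∨
      pvRk g = 4 ∨ pvRk g = 5 := by
    intro g; rw [pvRk_eq]; split_ifs <;> simp
  by_cases c0 : (gs.map PySem.Str.lower).contains "festival" = true
  · obtain ⟨g, hg, hl⟩ := (key _).mp c0
    have h1 : pvF gs 5 ≤ 0 := by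
      have := pvF_le_mem gs 5 g hg
      rwa [pvRk_eq, if_pos hl] at this
    have h2 : (0:Int) ≤ pvF gs 5 :=
      pvF_lb gs 5 0 (by norm_num) (fun g _ => by rcases rk_cases g with h|h|h|h|h|h <;> omega)
    have hF : pvF gs 5 = 0 := le_antisymm h1 h2
    simp [hF, pvColors, PySem.List.pyGet?, PySem.List.pyIdx?,
          show ∃ a ∈ gs, PySem.Str.lower a = "festival" from ⟨g, hg, hl⟩]
  · by_cases c1 : (gs.map PySem.Str.lower).contains "club" = true
    · obtain ⟨g, hg, hl⟩ := (key _).mp c1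
      have h1 : pvF gs 5 ≤ 1 := by
        have := pvF_le_mem gs 5 g hg
        have hrk : pvRk g = 1 := by
          rw [pvRk_eq]
          rw [if_neg (by rw [hl]; decide), if_pos hl]
        omega
      have h2 : (1:Int) ≤ pvF gs 5 := by
        refine pvF_lb gs 5 1 (by norm_num) (fun g hg => ?_)
        have hne : ¬ PySem.Str.lower g = "festival" := by
          intro h; exact c0 ((key _).mpr ⟨g, hg, h⟩)
        rw [pvRk_eq, if_neg hne]; split_ifs <;> omega
      have hF : pvF gs 5 = 1 := le_antisymm h1 h2
      have n0 : ¬ ∃ a ∈ gs, PySem.Str.lower a = "festival" := fun h => c0 ((key _).mpr h)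
      simp [n0, hF, pvColors, PySem.List.pyGet?, PySem.List.pyIdx?,
            show ∃ a ∈ gs, PySem.Str.lower a = "club" from ⟨g, hg, hl⟩]
    · by_cases c2 : (gs.map PySem.Str.lower).contains "open air" = true ∨
          (gs.map PySem.Str.lower).contains "outdoor" = true
      · have hex : ∃ g ∈ gs, pvRk g = 2 := by
          rcases c2 with c | c
          · obtain ⟨g, hg, hl⟩ := (key _).mp c
            refine ⟨g, hg, ?_⟩
            rw [pvRk_eq, if_neg (by rw [hl]; decide), if_neg (by rw [hl]; decide), if_pos hl]
          · obtain ⟨g, hg, hl⟩ := (key _).mp c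
            refine ⟨g, hg, ?_⟩
            rw [pvRk_eq, if_neg (by rw [hl]; decide), if_neg (by rw [hl]; decide),
                if_neg (by rw [hl]; decide), if_pos hl]
        obtain ⟨g, hg, hrk⟩ := hex
        have h1 : pvF gs 5 ≤ 2 := by have := pvF_le_mem gs 5 g hg; omega
        have h2 : (2:Int) ≤ pvF gs 5 := by
          refine pvF_lb gs 5 2 (by norm_num) (fun g hg => ?_)
          have hne0 : ¬ PySem.Str.lower g = "festival" := fun h => c0 ((key _).mpr ⟨g, hg, h⟩)
          have hne1 : ¬ PySem.Str.lower g = "club" := fun h => c1 ((key _).mpr ⟨g, hg, h⟩)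
          rw [pvRk_eq, if_neg hne0, if_neg hne1]; split_ifs <;> omega
        have hF : pvF gs 5 = 2 := le_antisymm h1 h2
        have n0 : ¬ ∃ a ∈ gs, PySem.Str.lower a = "festival" := fun h => c0 ((key _).mpr h)
        have n1 : ¬ ∃ a ∈ gs, PySem.Str.lower a = "club" := fun h => c1 ((key _).mpr h)
        have p2 : (∃ a ∈ gs, PySem.Str.lower a = "open air") ∨
            ∃ a ∈ gs, PySem.Str.lower a = "outdoor" := by
          rcases c2 with c | c
          · exact Or.inl ((key _).mp c)
          · exact Or.inr ((key _).mp c)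
        simp [n0, n1, p2, hF, pvColors, PySem.List.pyGet?, PySem.List.pyIdx?]
      · push Not at c2
        obtain ⟨c2a, c2b⟩ := c2
        by_cases c3 : (gs.map PySem.Str.lower).contains "psytrance" = true ∨
            (gs.map PySem.Str.lower).contains "goa" = true
        · have hex : ∃ g ∈ gs, pvRk g = 3 := by
            rcases c3 with c | c
            · obtain ⟨g, hg, hl⟩ := (key _).mp c
              refine ⟨g, hg, ?_⟩
              rw [pvRk_eq, if_neg (by rw [hl]; decide), if_neg (by rw [hl]; decide),
                  if_neg (by rw [hl]; decide), if_neg (by rw [hl]; decide), if_pos hl]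
            · obtain ⟨g, hg, hl⟩ := (key _).mp c
              refine ⟨g, hg, ?_⟩
              rw [pvRk_eq, if_neg (by rw [hl]; decide), if_neg (by rw [hl]; decide),
                  if_neg (by rw [hl]; decide), if_neg (by rw [hl]; decide),
                  if_neg (by rw [hl]; decide), if_pos hl]
          obtain ⟨g, hg, hrk⟩ := hex
          have h1 : pvF gs 5 ≤ 3 := by have := pvF_le_mem gs 5 g hg; omega
          have h2 : (3:Int) ≤ pvF gs 5 := by
            refine pvF_lb gs 5 3 (by norm_num) (fun g hg => ?_)
            have hne0 : ¬ PySem.Str.lower g = "festival" := fun h => c0 ((key _).mpr ⟨g, hg, h⟩)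
            have hne1 : ¬ PySem.Str.lower g = "club" := fun h => c1 ((key _).mpr ⟨g, hg, h⟩)
            have hne2 : ¬ PySem.Str.lower g = "open air" := fun h => c2a ((key _).mpr ⟨g, hg, h⟩)
            have hne3 : ¬ PySem.Str.lower g = "outdoor" := fun h => c2b ((key _).mpr ⟨g, hg, h⟩)
            rw [pvRk_eq, if_neg hne0, if_neg hne1, if_neg hne2, if_neg hne3]
            split_ifs <;> omega
          have hF : pvF gs 5 = 3 := le_antisymm h1 h2
          have n0 : ¬ ∃ a ∈ gs, PySem.Str.lower a = "festival" := fun h => c0 ((key _).mpr h)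
          have n1 : ¬ ∃ a ∈ gs, PySem.Str.lower a = "club" := fun h => c1 ((key _).mpr h)
          have n2a : ¬ ∃ a ∈ gs, PySem.Str.lower a = "open air" := fun h => c2a ((key _).mpr h)
          have n2b : ¬ ∃ a ∈ gs, PySem.Str.lower a = "outdoor" := fun h => c2b ((key _).mpr h)
          have p3 : (∃ a ∈ gs, PySem.Str.lower a = "psytrance") ∨
              ∃ a ∈ gs, PySem.Str.lower a = "goa" := by
            rcases c3 with c | c
            · exact Or.inl ((key _).mp c)
            · exact Or.inr ((key _).mp c)
          simp [n0, n1, n2a, n2b, p3, hF, pvColors, PySem.List.pyGet?, PySem.List.pyIdx?]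
        · push Not at c3
          obtain ⟨c3a, c3b⟩ := c3
          by_cases c4 : (gs.map PySem.Str.lower).contains "techno" = true
          · obtain ⟨g, hg, hl⟩ := (key _).mp c4
            have hrk : pvRk g = 4 := by
              rw [pvRk_eq, if_neg (by rw [hl]; decide), if_neg (by rw [hl]; decide),
                  if_neg (by rw [hl]; decide), if_neg (by rw [hl]; decide),
                  if_neg (by rw [hl]; decide), if_neg (by rw [hl]; decide), if_pos hl]
            have h1 : pvF gs 5 ≤ 4 := by have := pvF_le_mem gs 5 g hg; omega
            have h2 : (4:Int) ≤ pvF gs 5 := by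
              refine pvF_lb gs 5 4 (by norm_num) (fun g hg => ?_)
              have hne0 : ¬ PySem.Str.lower g = "festival" := fun h => c0 ((key _).mpr ⟨g, hg, h⟩)
              have hne1 : ¬ PySem.Str.lower g = "club" := fun h => c1 ((key _).mpr ⟨g, hg, h⟩)
              have hne2 : ¬ PySem.Str.lower g = "open air" := fun h => c2a ((key _).mpr ⟨g, hg, h⟩)
              have hne3 : ¬ PySem.Str.lower g = "outdoor" := fun h => c2b ((key _).mpr ⟨g, hg, h⟩)
              have hne4 : ¬ PySem.Str.lower g = "psytrance" := fun h => c3a ((key _).mpr ⟨g, hg, h⟩)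
              have hne5 : ¬ PySem.Str.lower g = "goa" := fun h => c3b ((key _).mpr ⟨g, hg, h⟩)
              rw [pvRk_eq, if_neg hne0, if_neg hne1, if_neg hne2, if_neg hne3, if_neg hne4,
                  if_neg hne5]
              split_ifs <;> omega
            have hF : pvF gs 5 = 4 := le_antisymm h1 h2
            have n0 : ¬ ∃ a ∈ gs, PySem.Str.lower a = "festival" := fun h => c0 ((key _).mpr h)
            have n1 : ¬ ∃ a ∈ gs, PySem.Str.lower a = "club" := fun h => c1 ((key _).mpr h)
            have n2a : ¬ ∃ a ∈ gs, PySem.Str.lower a = "open air" := fun h => c2a ((key _).mpr h)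
            have n2b : ¬ ∃ a ∈ gs, PySem.Str.lower a = "outdoor" := fun h => c2b ((key _).mpr h)
            have n3a : ¬ ∃ a ∈ gs, PySem.Str.lower a = "psytrance" := fun h => c3a ((key _).mpr h)
            have n3b : ¬ ∃ a ∈ gs, PySem.Str.lower a = "goa" := fun h => c3b ((key _).mpr h)
            simp [n0, n1, n2a, n2b, n3a, n3b, hF, pvColors, PySem.List.pyGet?, PySem.List.pyIdx?,
                  show ∃ a ∈ gs, PySem.Str.lower a = "techno" from ⟨g, hg, hl⟩]
          · have h2 : (5:Int) ≤ pvF gs 5 := by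
              refine pvF_lb gs 5 5 (le_refl _) (fun g hg => ?_)
              have hne0 : ¬ PySem.Str.lower g = "festival" := fun h => c0 ((key _).mpr ⟨g, hg, h⟩)
              have hne1 : ¬ PySem.Str.lower g = "club" := fun h => c1 ((key _).mpr ⟨g, hg, h⟩)
              have hne2 : ¬ PySem.Str.lower g = "open air" := fun h => c2a ((key _).mpr ⟨g, hg, h⟩)
              have hne3 : ¬ PySem.Str.lower g = "outdoor" := fun h => c2b ((key _).mpr ⟨g, hg, h⟩)
              have hne4 : ¬ PySem.Str.lower g = "psytrance" := fun h => c3a ((key _).mpr ⟨g, hg, h⟩)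
              have hne5 : ¬ PySem.Str.lower g = "goa" := fun h => c3b ((key _).mpr ⟨g, hg, h⟩)
              have hne6 : ¬ PySem.Str.lower g = "techno" := fun h => c4 ((key _).mpr ⟨g, hg, h⟩)
              rw [pvRk_eq, if_neg hne0, if_neg hne1, if_neg hne2, if_neg hne3, if_neg hne4,
                  if_neg hne5, if_neg hne6]
            have hF : pvF gs 5 = 5 := le_antisymm (pvF_le_init gs 5) h2
            have n0 : ¬ ∃ a ∈ gs, PySem.Str.lower a = "festival" := fun h => c0 ((key _).mpr h)
            have n1 : ¬ ∃ a ∈ gs, PySem.Str.lower a = "club" := fun h => c1 ((key _).mpr h)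
            have n2a : ¬ ∃ a ∈ gs, PySem.Str.lower a = "open air" := fun h => c2a ((key _).mpr h)
            have n2b : ¬ ∃ a ∈ gs, PySem.Str.lower a = "outdoor" := fun h => c2b ((key _).mpr h)
            have n3a : ¬ ∃ a ∈ gs, PySem.Str.lower a = "psytrance" := fun h => c3a ((key _).mpr h)
            have n3b : ¬ ∃ a ∈ gs, PySem.Str.lower a = "goa" := fun h => c3b ((key _).mpr h)
            have n4 : ¬ ∃ a ∈ gs, PySem.Str.lower a = "techno" := fun h => c4 ((key _).mpr h)
            simp [n0, n1, n2a, n2b, n3a, n3b, n4, hF]
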